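-- pv_equiv track=rewrite | github.com/zhanxinl/self-teaching | 185apple_plan/mit-introduction to Computer Science and Programming in Python/hw/ps3.py | subStringMatchOneSub
-- ===== SOURCE A (Python) =====
-- def subStringMatchExact(target,key):
--     ans_tup=()
--
--     if len(key)>len(target):
--         return ans_tup
--
--     count=0
--
--     for i in range(0,len(target)-len(key)):
--         if key==target[i:i+len(key)]:
--             count+=1
--             ans_tup=ans_tup+(i,)
--
--     return ans_tup
--
-- def constrainedMatchPair(start_first,start_second,len_first):
--     ans_tup=()
--     for n in start_first:
--         for k in start_second:
--             if n+len_first+1==k: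
--                 ans_tup+=(n,)
--
--     return ans_tup
--
-- def subStringMatchOneSub(key,target):
--     """search for all locations of key in target, with one substitution"""
--     allAnswers = ()
--     for miss in range(0,len(key)):
--         # miss picks location for missing element
--         # key1 and key2 are substrings to match
--         key1 = key[:miss]
--         key2 = key[miss+1:]
--         print ('breaking key',key,'into',key1,key2)
--         # match1 and match2 are tuples of locations of start of matches
--         # for each substring in target
--         match1 = subStringMatchExact(target,key1)
--         match2 = subStringMatchExact(target,key2)
--         # when we get here, we have two tuples of start points
--         # need to filter pairs to decide which are correct
--         filtered = constrainedMatchPair(match1,match2,len(key1))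
--         allAnswers = allAnswers + filtered
--         print ('match1',match1)
--         print ('match2',match2)
--         print ('possible matches for',key1,key2,'start at',filtered)
--     return (allAnswers)
-- ===== SOURCE B (Python) =====
-- def subStringMatchOneSub(key, target):
--     """search for all locations of key in target, with one substitution
--
--     Direct sliding-window scan: for each split position `miss`, compare the
--     two slices of key against the window at each candidate start, instead of
--     building full exact-match position lists and pairing them quadratically.
--     (Return value only: A also prints progress messages; B does not.)
--     """
--     m = len(key)
--     n = len(target)
--     res = []
--     for miss in range(m):
--         for pos in range(n - m):
--             if key[:miss] == target[pos:pos + miss] and \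
--                key[miss + 1:] == target[pos + miss + 1:pos + m]:
--                 res.append(pos)
--     return tuple(res)
-- ===== Notes on version B (the rewrite author's own statement) =====
-- stated objective: faster
-- what changed: B drops the exact-match position lists and the quadratic pair-filtering pass entirely: one nested scan compares the two key slices directly against each candidate window, appending positions in the same (miss, pos) order; B also omits A's print statements (return value is identical).
import Mathlib
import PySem

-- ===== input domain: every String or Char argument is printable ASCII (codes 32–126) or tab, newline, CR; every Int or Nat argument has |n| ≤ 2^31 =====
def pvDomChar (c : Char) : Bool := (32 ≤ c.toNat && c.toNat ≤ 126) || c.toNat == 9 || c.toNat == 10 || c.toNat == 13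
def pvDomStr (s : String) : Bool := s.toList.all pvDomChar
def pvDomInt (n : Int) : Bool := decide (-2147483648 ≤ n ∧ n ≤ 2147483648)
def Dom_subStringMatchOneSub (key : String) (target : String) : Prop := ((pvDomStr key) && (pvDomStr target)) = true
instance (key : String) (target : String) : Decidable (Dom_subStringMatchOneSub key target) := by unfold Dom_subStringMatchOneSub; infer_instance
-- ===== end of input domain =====

-- ===== PORT A =====
-- One honest line: B replaces A's exact-match lists + quadratic pair filtering by a direct
-- nested slice-comparison scan (same return value; A's print side effects are not reproduced).
-- subStringMatchExact(target, key) from Source A (the dead `count` variable is omitted)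
def pvExact (target : List Char) (key : List Char) : List Int :=
  if key.length > target.length then []
  else
    (PySem.List.pyRange 0 ((target.length : Int) - (key.length : Int)) 1).foldl
      (fun ans i =>
        if key = PySem.List.slice target (some i) (some (i + (key.length : Int))) then ans ++ [i]
        else ans) []

-- constrainedMatchPair(start_first, start_second, len_first) from Source A
def pvConstrained (startFirst : List Int) (startSecond : List Int) (lenFirst : Int) : List Int :=
  startFirst.foldl
    (fun ans n =>
      startSecond.foldl (fun a k => if n + lenFirst + 1 = k then a ++ [n] else a) ans) []

def subStringMatchOneSub (key : String) (target : String) : List Int :=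
  let k := key.toList
  (PySem.List.pyRange 0 (k.length : Int) 1).foldl
    (fun allAnswers miss =>
      let key1 := PySem.List.slice k none (some miss)
      let key2 := PySem.List.slice k (some (miss + 1)) none
      let match1 := pvExact target.toList key1
      let match2 := pvExact target.toList key2
      let filtered := pvConstrained match1 match2 (key1.length : Int)
      allAnswers ++ filtered) []

-- ===== PORT B =====
def subStringMatchOneSub_alt (key : String) (target : String) : List Int :=
  let k := key.toList
  let t := target.toList
  let m : Int := k.length
  let n : Int := t.length
  (PySem.List.pyRange 0 m 1).foldl
    (fun res miss =>
      (PySem.List.pyRange 0 (n - m) 1).foldl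
        (fun res pos =>
          if PySem.List.slice k none (some miss) =
               PySem.List.slice t (some pos) (some (pos + miss)) ∧
             PySem.List.slice k (some (miss + 1)) none =
               PySem.List.slice t (some (pos + miss + 1)) (some (pos + m))
          then res ++ [pos] else res) res) []

-- ===== PRECONDITION & SPEC =====
def Spec_subStringMatchOneSub (key : String) (target : String) (out : List Int) : Prop := out = subStringMatchOneSub_alt key target
instance (key : String) (target : String) (out : List Int) : Decidable (Spec_subStringMatchOneSub key target out) := by unfold Spec_subStringMatchOneSub; infer_instance

-- ===== CLAIM (what is proved, stated in full; the proofs are below) =====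
def Claim_equal_subStringMatchOneSub : Prop := ∀ (key : String) (target : String), Dom_subStringMatchOneSub key target → Spec_subStringMatchOneSub key target (subStringMatchOneSub key target)

-- ===== LEMMAS AND PROOFS =====

-- a filter for "equals v" on a duplicate-free list keeps at most the one occurrence of v
lemma pv_filter_eq_singleton (v : Int) (l : List Int) (h : l.Nodup) :
    l.filter (fun k => decide (v = k)) = if v ∈ l then [v] else [] := by
  induction l with
  | nil => simp
  | cons a l ih =>
    simp only [List.nodup_cons] at h
    by_cases hva : v = a
    · subst hva
      have hnil : l.filter (fun k => decide (v = k)) = [] :=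
        List.filter_eq_nil_iff.mpr (fun k hk => by
          simp only [decide_eq_true_eq]
          rintro rfl; exact h.1 hk)
      simp [hnil]
    · simp [hva, ih h.2]

-- A's exact matcher is a filtered range (the early return coincides with the empty range)
lemma pvExact_eq_filter (t k : List Char) :
    pvExact t k = (PySem.List.pyRange 0 ((t.length : Int) - (k.length : Int)) 1).filter
      (fun i => decide (k = PySem.List.slice t (some i) (some (i + (k.length : Int))))) := by
  unfold pvExact
  split
  · rename_i hlen
    rw [PySem.List.pyRange_one_eq_nil (by omega)]
    simp
  · rw [PySem.List.foldl_append_ite_eq_filter]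
    simp

lemma mem_pvExact (t k : List Char) (i : Int) :
    i ∈ pvExact t k ↔
      0 ≤ i ∧ i < (t.length : Int) - (k.length : Int) ∧
        k = PySem.List.slice t (some i) (some (i + (k.length : Int))) := by
  rw [pvExact_eq_filter]
  simp [List.mem_filter, PySem.List.mem_pyRange_one, and_assoc]

lemma nodup_pvExact (t k : List Char) : (pvExact t k).Nodup := by
  rw [pvExact_eq_filter]
  exact (PySem.List.nodup_pyRange_one 0 _).filter _

-- the quadratic pair filter is a membership filter when the second list is duplicate-free
lemma pvConstrained_eq (fst snd : List Int) (L : Int) (h : snd.Nodup) :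
    pvConstrained fst snd L = fst.filter (fun n => decide (n + L + 1 ∈ snd)) := by
  unfold pvConstrained
  have hstep : ∀ (acc : List Int), ∀ n ∈ fst,
      snd.foldl (fun a k => if n + L + 1 = k then a ++ [n] else a) acc
        = if n + L + 1 ∈ snd then acc ++ [n] else acc := by
    intro acc n _
    rw [PySem.List.foldl_append_ite (p := fun k => n + L + 1 = k) (f := fun _ => n),
      pv_filter_eq_singleton _ _ h]
    by_cases hmem : n + L + 1 ∈ snd <;> simp [hmem]
  rw [PySem.List.foldl_congr_mem _ _ _ _ hstep, PySem.List.foldl_append_ite_eq_filter]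
  simp

-- length of the two key slices, as integers
lemma pv_len_key1 (k : List Char) (miss : Int) (h0 : 0 ≤ miss) (h1 : miss < (k.length : Int)) :
    ((PySem.List.slice k none (some miss)).length : Int) = miss := by
  rw [PySem.List.slice_to k h0]
  simp
  omega

lemma pv_len_key2 (k : List Char) (miss : Int) (h0 : 0 ≤ miss) (h1 : miss < (k.length : Int)) :
    ((PySem.List.slice k (some (miss + 1)) none).length : Int) = (k.length : Int) - miss - 1 := by
  rw [PySem.List.slice_from k (by omega)]
  simp
  omega

-- shrink a filtered range when the predicate is false on the cut-off tail
lemma pv_filter_pyRange_ext (b b' : Int) (p q : Int → Bool) (hbb : b' ≤ b)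
    (h1 : ∀ i, 0 ≤ i → i < b' → p i = q i)
    (h2 : ∀ i, 0 ≤ i → b' ≤ i → i < b → p i = false) :
    (PySem.List.pyRange 0 b 1).filter p = (PySem.List.pyRange 0 b' 1).filter q := by
  by_cases hb' : 0 ≤ b'
  · have htail : (PySem.List.pyRange b' b 1).filter p = [] :=
      List.filter_eq_nil_iff.mpr (fun i hi => by
        rw [PySem.List.mem_pyRange_one] at hi
        simp [h2 i (by omega) hi.1 hi.2])
    rw [PySem.List.pyRange_one_append 0 b' b hb' hbb, List.filter_append, htail,
      List.append_nil]
    exact List.filter_congr (fun i hi => by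
      rw [PySem.List.mem_pyRange_one] at hi
      exact h1 i hi.1 hi.2)
  · rw [PySem.List.pyRange_one_eq_nil (b := b') (by omega)]
    simp only [List.filter_nil]
    exact List.filter_eq_nil_iff.mpr (fun i hi => by
      rw [PySem.List.mem_pyRange_one] at hi
      simp [h2 i hi.1 (by omega) hi.2])

-- per-miss: A's match1/match2 pairing equals B's direct window filter
lemma pv_per_miss (k t : List Char) (miss : Int) (h0 : 0 ≤ miss) (h1 : miss < (k.length : Int)) :
    pvConstrained (pvExact t (PySem.List.slice k none (some miss)))
        (pvExact t (PySem.List.slice k (some (miss + 1)) none))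
        ((PySem.List.slice k none (some miss)).length : Int)
      = (PySem.List.pyRange 0 ((t.length : Int) - (k.length : Int)) 1).filter
          (fun pos => decide (PySem.List.slice k none (some miss) =
              PySem.List.slice t (some pos) (some (pos + miss)) ∧
            PySem.List.slice k (some (miss + 1)) none =
              PySem.List.slice t (some (pos + miss + 1)) (some (pos + (k.length : Int))))) := by
  rw [pvConstrained_eq _ _ _ (nodup_pvExact _ _),
    pvExact_eq_filter t (PySem.List.slice k none (some miss)), List.filter_filter,
    pv_len_key1 k miss h0 h1]
  apply pv_filter_pyRange_ext _ _ _ _ (by omega)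
  · intro i hi0 hi1
    rw [← Bool.decide_and, decide_eq_decide]
    constructor
    · rintro ⟨hmem, hsl⟩
      rw [mem_pvExact, pv_len_key2 k miss h0 h1] at hmem
      refine ⟨hsl, ?_⟩
      have harg : i + miss + 1 + ((k.length : Int) - miss - 1) = i + (k.length : Int) := by ring
      rw [← harg]
      exact hmem.2.2
    · rintro ⟨hsl1, hsl2⟩
      refine ⟨?_, hsl1⟩
      rw [mem_pvExact, pv_len_key2 k miss h0 h1]
      refine ⟨by omega, by omega, ?_⟩
      have harg : i + miss + 1 + ((k.length : Int) - miss - 1) = i + (k.length : Int) := by ring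
      rw [harg]
      exact hsl2
  · intro i hi0 hib hi2
    have hnm : ¬ (i + miss + 1 ∈ pvExact t (PySem.List.slice k (some (miss + 1)) none)) := by
      rw [mem_pvExact, pv_len_key2 k miss h0 h1]
      rintro ⟨-, hlt, -⟩
      omega
    rw [decide_eq_false hnm, Bool.false_and]



-- ===== VERDICT (by name: the statement is the Claim_ definition above) =====
theorem subStringMatchOneSub_spec : Claim_equal_subStringMatchOneSub := by
  intro key target _
  unfold Spec_subStringMatchOneSub
  simp only [subStringMatchOneSub, subStringMatchOneSub_alt]
  have hB : ∀ (res : List Int), ∀ miss ∈ PySem.List.pyRange 0 (key.toList.length : Int) 1,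
      (PySem.List.pyRange 0 ((target.toList.length : Int) - (key.toList.length : Int)) 1).foldl
        (fun res pos =>
          if PySem.List.slice key.toList none (some miss) =
               PySem.List.slice target.toList (some pos) (some (pos + miss)) ∧
             PySem.List.slice key.toList (some (miss + 1)) none =
               PySem.List.slice target.toList (some (pos + miss + 1))
                 (some (pos + (key.toList.length : Int)))
          then res ++ [pos] else res) res
      = res ++ (PySem.List.pyRange 0 ((target.toList.length : Int) - (key.toList.length : Int)) 1).filter
          (fun pos => decide (PySem.List.slice key.toList none (some miss) =
              PySem.List.slice target.toList (some pos) (some (pos + miss)) ∧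
            PySem.List.slice key.toList (some (miss + 1)) none =
              PySem.List.slice target.toList (some (pos + miss + 1))
                (some (pos + (key.toList.length : Int))))) := by
    intro res miss _
    rw [PySem.List.foldl_append_ite_eq_filter]
  have hA : ∀ (acc : List Int), ∀ miss ∈ PySem.List.pyRange 0 (key.toList.length : Int) 1,
      acc ++ pvConstrained (pvExact target.toList (PySem.List.slice key.toList none (some miss)))
          (pvExact target.toList (PySem.List.slice key.toList (some (miss + 1)) none))
          ((PySem.List.slice key.toList none (some miss)).length : Int)
      = acc ++ (PySem.List.pyRange 0 ((target.toList.length : Int) - (key.toList.length : Int)) 1).filter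
          (fun pos => decide (PySem.List.slice key.toList none (some miss) =
              PySem.List.slice target.toList (some pos) (some (pos + miss)) ∧
            PySem.List.slice key.toList (some (miss + 1)) none =
              PySem.List.slice target.toList (some (pos + miss + 1))
                (some (pos + (key.toList.length : Int))))) := by
    intro acc miss hmiss
    rw [PySem.List.mem_pyRange_one] at hmiss
    rw [pv_per_miss key.toList target.toList miss hmiss.1 hmiss.2]
  rw [PySem.List.foldl_congr_mem _ _ _ _ hA, PySem.List.foldl_congr_mem _ _ _ _ hB]
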